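-- pv_equiv track=rewrite | github.com/stonedseeker/Yt-sum | summarizer/summarizer.py | _extractive_summary
-- ===== SOURCE A (Python) =====
-- def _extractive_summary(text: str, max_words: int) -> str:
--     """Fallback: Simple extractive summary using first sentences."""
--     sentences = text.split('.')
--     summary = []
--     word_count = 0
--
--     for sentence in sentences:
--         words = sentence.split()
--         if word_count + len(words) > max_words:
--             break
--         summary.append(sentence.strip())
--         word_count += len(words)
--
--     return '. '.join(summary) + '.'
-- ===== SOURCE B (Python) =====
-- def _extractive_summary(text: str, max_words: int) -> str:
--     """Same result via prefix sums: count how many cumulative word totals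
--     stay <= max_words (monotone, so this equals the first-exceedance cut),
--     then join that many stripped sentences."""
--     sentences = text.split('.')
--     prefix = []
--     total = 0
--     for s in sentences:
--         total += len(s.split())
--         prefix.append(total)
--     k = sum(1 for p in prefix if p <= max_words)
--     return '. '.join(s.strip() for s in sentences[:k]) + '.'
-- ===== Notes on version B (the rewrite author's own statement) =====
-- stated objective: alternative
-- what changed: Replaces the break-on-first-exceedance accumulator loop by a prefix-sum array: B counts the cumulative word totals that stay <= max_words (valid since the prefix sums are monotone) and joins that many stripped sentences taken by slicing.
import Mathlib
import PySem

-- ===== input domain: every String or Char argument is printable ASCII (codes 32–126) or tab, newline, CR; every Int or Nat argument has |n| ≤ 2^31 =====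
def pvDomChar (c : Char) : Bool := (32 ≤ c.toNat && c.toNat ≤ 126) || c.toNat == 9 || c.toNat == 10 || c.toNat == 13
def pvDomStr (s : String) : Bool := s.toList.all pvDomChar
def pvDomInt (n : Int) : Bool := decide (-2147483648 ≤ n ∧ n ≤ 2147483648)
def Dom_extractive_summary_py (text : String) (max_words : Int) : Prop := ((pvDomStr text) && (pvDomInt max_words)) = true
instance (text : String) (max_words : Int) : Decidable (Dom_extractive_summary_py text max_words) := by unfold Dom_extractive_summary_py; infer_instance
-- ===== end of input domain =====

-- B replaces A's break-on-first-exceedance accumulator loop by a prefix-sum count (alternative decomposition, same cost).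

-- ===== PORT A =====
-- the for-loop with break: state = (summary, word_count)
def pvALoop (max_words : Int) : List String → List String → Int → List String
  | [], summary, _ => summary
  | s :: rest, summary, wc =>
    let words := PySem.Str.split₀ s
    if wc + (words.length : Int) > max_words then summary
    else pvALoop max_words rest (summary ++ [PySem.Str.strip s]) (wc + (words.length : Int))

def extractive_summary_py (text : String) (max_words : Int) : String :=
  let sentences := (PySem.Str.split? text ".").getD []
  let summary := pvALoop max_words sentences [] 0
  PySem.Str.join "" [PySem.Str.join ". " summary, "."]

-- ===== PORT B =====
def extractive_summary_py_alt (text : String) (max_words : Int) : String :=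
  let sentences := (PySem.Str.split? text ".").getD []
  let pfx := (sentences.foldl
      (fun (acc : List Int × Int) s =>
        let t := acc.2 + ((PySem.Str.split₀ s).length : Int)
        (acc.1 ++ [t], t)) ([], 0)).1
  let k := pfx.countP (fun p => p ≤ max_words)
  PySem.Str.join "" [PySem.Str.join ". " ((sentences.take k).map PySem.Str.strip), "."]

-- ===== PRECONDITION & SPEC =====
def Spec_extractive_summary_py (text : String) (max_words : Int) (out : String) : Prop := out = extractive_summary_py_alt text max_words
instance (text : String) (max_words : Int) (out : String) : Decidable (Spec_extractive_summary_py text max_words out) := by unfold Spec_extractive_summary_py; infer_instance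

-- ===== CLAIM (what is proved, stated in full; the proofs are below) =====
def Claim_equal_extractive_summary_py : Prop := ∀ (text : String) (max_words : Int), Dom_extractive_summary_py text max_words → Spec_extractive_summary_py text max_words (extractive_summary_py text max_words)

-- ===== LEMMAS AND PROOFS =====

-- cumulative word totals starting from wc
def pvPrefixes (wc : Int) : List String → List Int
  | [] => []
  | s :: rest =>
    let t := wc + ((PySem.Str.split₀ s).length : Int)
    t :: pvPrefixes t rest

lemma pvFold_eq_prefixes (ss : List String) (acc : List Int) (t : Int) :
    (ss.foldl
      (fun (acc : List Int × Int) s =>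
        let u := acc.2 + ((PySem.Str.split₀ s).length : Int)
        (acc.1 ++ [u], u)) (acc, t)).1 = acc ++ pvPrefixes t ss := by
  induction ss generalizing acc t with
  | nil => simp [pvPrefixes]
  | cons s rest ih => simp [pvPrefixes, ih, List.append_assoc]

lemma pvPrefixes_ge (wc : Int) (ss : List String) :
    ∀ x ∈ pvPrefixes wc ss, wc ≤ x := by
  induction ss generalizing wc with
  | nil => simp [pvPrefixes]
  | cons s rest ih =>
    intro x hx
    simp only [pvPrefixes, List.mem_cons] at hx
    rcases hx with h | h
    · omega
    · have := ih (wc + ((PySem.Str.split₀ s).length : Int)) x h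
      have : (0 : Int) ≤ ((PySem.Str.split₀ s).length : Int) := Int.natCast_nonneg _
      omega

lemma pvALoop_eq (max_words : Int) (ss : List String) (summary : List String) (wc : Int) :
    pvALoop max_words ss summary wc =
      summary ++ ((ss.take ((pvPrefixes wc ss).countP (fun p => p ≤ max_words))).map PySem.Str.strip) := by
  induction ss generalizing summary wc with
  | nil => simp [pvALoop, pvPrefixes]
  | cons s rest ih =>
    simp only [pvALoop, pvPrefixes]
    set t := wc + ((PySem.Str.split₀ s).length : Int) with ht
    by_cases h : t > max_words
    · have hz : (pvPrefixes t rest).countP (fun p => p ≤ max_words) = 0 := by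
        rw [List.countP_eq_zero]
        intro x hx
        have := pvPrefixes_ge t rest x hx
        simp only [decide_eq_true_eq]
        omega
      simp [h, hz, show ¬ t ≤ max_words by omega]
    · have h' : t ≤ max_words := by omega
      rw [if_neg (by omega)]
      rw [ih]
      simp [h', List.append_assoc]

-- ===== VERDICT (by name: the statement is the Claim_ definition above) =====
theorem extractive_summary_py_spec : Claim_equal_extractive_summary_py := by
  intro text max_words _
  unfold Spec_extractive_summary_py extractive_summary_py extractive_summary_py_alt
  simp only [pvFold_eq_prefixes, List.nil_append, pvALoop_eq, List.nil_append]
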